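-- pv_equiv track=rewrite | github.com/biaphra/Sistema-Multi-Agente-SQL-Injection | agents/report_generator.py | _calculate_max_severity
-- ===== SOURCE A (Python) =====
-- from typing import Dict, List, Optional
--
-- def _calculate_max_severity(tests: List[Dict]) -> str:
--     """Calcula severidade máxima"""
--     severities = [t.get('severity', 'low') for t in tests]
--     if 'critical' in severities:
--         return 'critical'
--     elif 'high' in severities:
--         return 'high'
--     elif 'medium' in severities:
--         return 'medium'
--     else:
--         return 'low'
-- ===== SOURCE B (Python) =====
-- from typing import Dict, List, Optional
--
-- _RANK = {'critical': 3, 'high': 2, 'medium': 1, 'low': 0}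
-- _NAME = {3: 'critical', 2: 'high', 1: 'medium', 0: 'low'}
--
-- def _calculate_max_severity(tests: List[Dict]) -> str:
--     """Calcula severidade máxima"""
--     max_rank = 0
--     for t in tests:
--         max_rank = max(max_rank, _RANK.get(t.get('severity', 'low'), 0))
--     return _NAME[max_rank]
-- ===== Notes on version B (the rewrite author's own statement) =====
-- stated objective: simpler
-- what changed: Single maintained-maximum pass over a severity-rank table instead of building the full severities list and scanning it up to three times with membership tests.
import Mathlib
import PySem

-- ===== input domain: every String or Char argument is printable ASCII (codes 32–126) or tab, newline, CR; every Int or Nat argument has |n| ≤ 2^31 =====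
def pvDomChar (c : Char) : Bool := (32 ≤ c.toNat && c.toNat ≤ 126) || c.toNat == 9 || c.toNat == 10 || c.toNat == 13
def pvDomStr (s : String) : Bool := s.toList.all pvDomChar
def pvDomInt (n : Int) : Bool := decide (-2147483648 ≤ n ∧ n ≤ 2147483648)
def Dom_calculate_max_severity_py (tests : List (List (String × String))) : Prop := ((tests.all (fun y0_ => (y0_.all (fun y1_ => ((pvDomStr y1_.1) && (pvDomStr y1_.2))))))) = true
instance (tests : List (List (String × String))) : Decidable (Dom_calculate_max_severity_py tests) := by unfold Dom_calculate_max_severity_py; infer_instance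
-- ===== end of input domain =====

-- B replaces A's list-build plus up-to-three membership scans by one maintained-maximum
-- pass over a severity-rank table (objective: simpler).

-- shared port of Python's t.get('severity', 'low') on an association-list dict (first match)
def pvGetSev (t : List (String × String)) : String :=
  ((t.find? (fun p => p.1 == "severity")).map (·.2)).getD "low"

-- ===== PORT A =====
def calculate_max_severity_py (tests : List (List (String × String))) : String :=
  let severities := tests.map pvGetSev
  if severities.contains "critical" then "critical"
  else if severities.contains "high" then "high"
  else if severities.contains "medium" then "medium"
  else "low"

-- ===== PORT B =====
-- Source B: _RANK.get(s, 0) on the literal rank table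
def pvRank (s : String) : Nat :=
  ((([("critical", 3), ("high", 2), ("medium", 1), ("low", 0)] :
      List (String × Nat)).find? (fun p => p.1 == s)).map (·.2)).getD 0

-- Source B: _NAME[max_rank] on the literal reverse table (max_rank is always 0..3)
def pvName (r : Nat) : String :=
  ((([(3, "critical"), (2, "high"), (1, "medium"), (0, "low")] :
      List (Nat × String)).find? (fun p => p.1 == r)).map (·.2)).getD ""

def calculate_max_severity_py_alt (tests : List (List (String × String))) : String :=
  pvName (tests.foldl (fun acc t => max acc (pvRank (pvGetSev t))) 0)

-- ===== PRECONDITION & SPEC =====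
def Spec_calculate_max_severity_py (tests : List (List (String × String))) (out : String) : Prop := out = calculate_max_severity_py_alt tests
instance (tests : List (List (String × String))) (out : String) : Decidable (Spec_calculate_max_severity_py tests out) := by unfold Spec_calculate_max_severity_py; infer_instance

-- ===== CLAIM (what is proved, stated in full; the proofs are below) =====
def Claim_equal_calculate_max_severity_py : Prop := ∀ (tests : List (List (String × String))), Dom_calculate_max_severity_py tests → Spec_calculate_max_severity_py tests (calculate_max_severity_py tests)

-- ===== LEMMAS AND PROOFS =====

-- pull the accumulator out of B's fold
theorem pv_foldl_max (acc : Nat) (tests : List (List (String × String))) :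
    tests.foldl (fun acc t => max acc (pvRank (pvGetSev t))) acc
      = max acc (tests.foldl (fun acc t => max acc (pvRank (pvGetSev t))) 0) := by
  induction tests generalizing acc with
  | nil => simp
  | cons t ts ih =>
    simp only [List.foldl_cons]
    rw [ih, ih (max 0 _)]
    omega

-- the rank table as an if-chain
theorem pvRank_eq (s : String) :
    pvRank s = if s = "critical" then 3 else if s = "high" then 2 else if s = "medium" then 1 else 0 := by
  by_cases h1 : s = "critical" <;> by_cases h2 : s = "high" <;>
    by_cases h3 : s = "medium" <;> by_cases h4 : s = "low" <;>
    simp_all [pvRank, List.find?,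
      show ∀ a b : String, a ≠ b → (b == a) = false from fun a b h => beq_eq_false_iff_ne.mpr (Ne.symm h)]

set_option maxHeartbeats 2000000 in
-- B fold computes the rank of the if-chain answer
theorem pv_fold_eq_rank (tests : List (List (String × String))) :
    tests.foldl (fun acc t => max acc (pvRank (pvGetSev t))) 0
      = (if (tests.map pvGetSev).contains "critical" then 3
         else if (tests.map pvGetSev).contains "high" then 2
         else if (tests.map pvGetSev).contains "medium" then 1
         else 0) := by
  induction tests with
  | nil => simp
  | cons t ts ih =>
    simp only [List.foldl_cons, List.map_cons, List.contains_cons, Nat.zero_max]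
    rw [pv_foldl_max, ih, pvRank_eq]
    by_cases hc : pvGetSev t = "critical" <;> by_cases hh : pvGetSev t = "high" <;>
      by_cases hm : pvGetSev t = "medium" <;>
      by_cases bc : (List.map pvGetSev ts).contains "critical" = true <;>
      by_cases bh : (List.map pvGetSev ts).contains "high" = true <;>
      by_cases bm : (List.map pvGetSev ts).contains "medium" = true <;>
      simp_all <;> (try split_ifs) <;> simp_all [eq_comm] <;> tauto

-- ===== VERDICT (by name: the statement is the Claim_ definition above) =====
theorem calculate_max_severity_py_spec : Claim_equal_calculate_max_severity_py := by
  intro tests _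
  unfold Spec_calculate_max_severity_py calculate_max_severity_py calculate_max_severity_py_alt
  rw [pv_fold_eq_rank]
  show (if (tests.map pvGetSev).contains "critical" = true then "critical"
        else if (tests.map pvGetSev).contains "high" = true then "high"
        else if (tests.map pvGetSev).contains "medium" = true then "medium"
        else "low")
      = pvName (if (tests.map pvGetSev).contains "critical" = true then 3
        else if (tests.map pvGetSev).contains "high" = true then 2
        else if (tests.map pvGetSev).contains "medium" = true then 1
        else 0)
  split_ifs <;> rfl
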